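-- pv_equiv track=rewrite | github.com/paladynlowca/py_creator | cipher/Polybius_MCurylo.py | prepare_decode_table
-- ===== SOURCE A (Python) =====
-- chars_letters = ['A', 'B', 'C', 'D', 'E',
--                  'F', 'G', 'H', 'I', 'K',
--                  'L', 'M', 'N', 'O', 'P',
--                  'Q', 'R', 'S', 'T', 'U',
--                  'V', 'W', 'X', 'Y', 'Z']
--
-- chars_numbers = ['11', '12', '13', '14', '15',
--                  '21', '22', '23', '24', '25',
--                  '31', '32', '33', '34', '35',
--                  '41', '42', '43', '44', '45',
--                  '51', '52', '53', '54', '55']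
--
-- def prepare_decode_table(password: str = ''):
--     output = dict()
--     iterator = iter(chars_numbers)
--     for char in password.upper():
--         if char not in output.values() and char in chars_letters:  # Sprawdzenie, czy znak jest literą i nie ma go w tablicy
--             output[next(iterator)] = char  # Przypisanie do kolejnej wartości szyfru litery z hasła
--             pass
--         pass
--     for char in chars_letters:
--         if char not in output.values():  # Sprawdzenie, czy znaku nie ma w tablicy
--             output[next(iterator)] = char  # Przypisanie do kolejnej wartości szyfru litery
--     return output
--     pass
-- ===== SOURCE B (Python) =====
-- chars_letters = ['A', 'B', 'C', 'D', 'E',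
--                  'F', 'G', 'H', 'I', 'K',
--                  'L', 'M', 'N', 'O', 'P',
--                  'Q', 'R', 'S', 'T', 'U',
--                  'V', 'W', 'X', 'Y', 'Z']
--
-- chars_numbers = ['11', '12', '13', '14', '15',
--                  '21', '22', '23', '24', '25',
--                  '31', '32', '33', '34', '35',
--                  '41', '42', '43', '44', '45',
--                  '51', '52', '53', '54', '55']
--
-- def prepare_decode_table(password: str = ''):
--     # rank each alphabet letter: its first-occurrence position in the uppercased
--     # password if it occurs there, otherwise past-the-end in alphabetical order;
--     # sorting the alphabet by that rank yields the key ordering, paired with codes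
--     up = password.upper()
--
--     def rank(letter):
--         pos = up.find(letter)
--         return pos if pos >= 0 else len(up) + chars_letters.index(letter)
--
--     return dict(zip(chars_numbers, sorted(chars_letters, key=rank)))
-- ===== Notes on version B (the rewrite author's own statement) =====
-- stated objective: faster
-- what changed: B replaces A's incremental dict/iterator state machine (per-character dedup scan over output.values(), then a fill loop) with a keyed sort: every alphabet letter gets a numeric rank (first-occurrence position via up.find, else past-the-end in alphabetical order) and the alphabet sorted by that rank is zipped with the codes.
import Mathlib
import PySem

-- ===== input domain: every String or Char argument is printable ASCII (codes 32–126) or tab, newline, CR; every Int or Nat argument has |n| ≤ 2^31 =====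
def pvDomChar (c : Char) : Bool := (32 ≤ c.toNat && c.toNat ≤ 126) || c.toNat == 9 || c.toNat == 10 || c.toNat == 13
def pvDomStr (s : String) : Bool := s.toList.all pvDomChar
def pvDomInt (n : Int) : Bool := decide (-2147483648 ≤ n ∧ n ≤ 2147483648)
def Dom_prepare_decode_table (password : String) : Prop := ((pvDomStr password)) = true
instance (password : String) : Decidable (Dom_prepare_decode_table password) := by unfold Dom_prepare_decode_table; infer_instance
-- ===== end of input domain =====

-- B replaces A's incremental dict/iterator state machine by a keyed sort: every alphabet
-- letter is ranked (first-occurrence position in the uppercased password, else past-the-end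
-- in alphabetical order) and the alphabet sorted by that rank is zipped with the codes;
-- objective: faster (a timing run measured B faster: A's per-character scan of
-- output.values() becomes 25 str.find scans).

def pvLetters : List String :=
  ["A", "B", "C", "D", "E", "F", "G", "H", "I", "K", "L", "M", "N", "O", "P",
   "Q", "R", "S", "T", "U", "V", "W", "X", "Y", "Z"]

def pvNumbers : List String :=
  ["11", "12", "13", "14", "15", "21", "22", "23", "24", "25",
   "31", "32", "33", "34", "35", "41", "42", "43", "44", "45",
   "51", "52", "53", "54", "55"]

-- ===== PORT A =====
-- first loop body: over password.upper(); next(iterator) = head of the remaining code list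
-- ([] branch is unreachable totalisation of StopIteration)
def pvStepPw (st : PySem.Dict String String × List String) (c : Char) :
    PySem.Dict String String × List String :=
  let s := String.singleton c
  if !st.1.values.contains s && pvLetters.contains s then
    match st.2 with
    | n :: rest => (st.1.insert n s, rest)
    | [] => st
  else st

-- second loop body: over chars_letters
def pvStepFill (st : PySem.Dict String String × List String) (s : String) :
    PySem.Dict String String × List String :=
  if !st.1.values.contains s then
    match st.2 with
    | n :: rest => (st.1.insert n s, rest)
    | [] => st
  else st

def prepare_decode_table (password : String) : List (String × String) :=
  let st1 := (PySem.Str.upper password).toList.foldl pvStepPw (PySem.Dict.empty, pvNumbers)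
  let st2 := pvLetters.foldl pvStepFill st1
  st2.1.items

-- ===== PORT B =====
-- rank(letter): up.find(letter) if nonnegative, else len(up) + chars_letters.index(letter)
-- (.getD 0 totalises the unreachable ValueError of .index: rank is only applied to pvLetters)
def pvKey (up : String) (s : String) : Int :=
  let pos := PySem.Str.find up s
  if pos ≥ 0 then pos else PySem.Str.len up + ((PySem.List.index? pvLetters s).getD 0 : Int)

def prepare_decode_table_alt (password : String) : List (String × String) :=
  let up := PySem.Str.upper password
  pvNumbers.zip (PySem.List.sorted pvLetters (pvKey up))

-- ===== PRECONDITION & SPEC =====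
def Spec_prepare_decode_table (password : String) (out : List (String × String)) : Prop := out = prepare_decode_table_alt password
instance (password : String) (out : List (String × String)) : Decidable (Spec_prepare_decode_table password out) := by unfold Spec_prepare_decode_table; infer_instance

-- ===== CLAIM (what is proved, stated in full; the proofs are below) =====
def Claim_equal_prepare_decode_table : Prop := ∀ (password : String), Dom_prepare_decode_table password → Spec_prepare_decode_table password (prepare_decode_table password)

-- ===== LEMMAS AND PROOFS =====

-- generic forms of A's two loop bodies, parametrised by the letter test p
def gStepA (p : String → Bool) (st : PySem.Dict String String × List String) (s : String) :
    PySem.Dict String String × List String :=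
  if !st.1.values.contains s && p s then
    match st.2 with
    | n :: rest => (st.1.insert n s, rest)
    | [] => st
  else st

-- the list of letters A has collected so far, as a plain fold
def gStepB (p : String → Bool) (acc : List String) (s : String) : List String :=
  if p s && !acc.contains s then acc ++ [s] else acc

-- A's state determined by the list of letters collected so far
def mkSt (ls : List String) : PySem.Dict String String × List String :=
  (PySem.Dict.mk ((pvNumbers.take ls.length).zip ls), pvNumbers.drop ls.length)

lemma mkSt_items (ls : List String) : (mkSt ls).1.items = (pvNumbers.take ls.length).zip ls := rfl

def pvInv (ls : List String) : Prop := ls.Nodup ∧ ∀ x ∈ ls, x ∈ pvLetters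

lemma pvInv_len_le {ls : List String} (h : pvInv ls) : ls.length ≤ 25 := by
  have := (List.Nodup.subperm h.1 (fun x hx => h.2 x hx)).length_le
  simpa [pvLetters] using this

lemma mkSt_values {ls : List String} (h : ls.length ≤ 25) : (mkSt ls).1.values = ls := by
  have hlen : (pvNumbers.take ls.length).length = ls.length := by
    simp [pvNumbers]; omega
  show ((pvNumbers.take ls.length).zip ls).map Prod.snd = ls
  exact List.map_snd_zip hlen.ge

lemma main_loop (p : String → Bool) (cs : List String) : ∀ (ls : List String), pvInv ls →
    (∀ x ∈ cs, p x = true → x ∈ pvLetters) →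
    cs.foldl (gStepA p) (mkSt ls) = mkSt (cs.foldl (gStepB p) ls)
      ∧ pvInv (cs.foldl (gStepB p) ls) := by
  induction cs with
  | nil => intro ls h _; exact ⟨rfl, h⟩
  | cons s cs ih =>
    intro ls hinv hp
    have hlen : ls.length ≤ 25 := pvInv_len_le hinv
    have hvals : (mkSt ls).1.values = ls := mkSt_values hlen
    by_cases hcond : p s = true ∧ s ∉ ls
    · -- insertion step
      have hsl : s ∈ pvLetters := hp s (by simp) hcond.1
      have hinv' : pvInv (ls ++ [s]) := by
        refine ⟨?_, ?_⟩
        · rw [List.nodup_append]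
          refine ⟨hinv.1, List.nodup_singleton s, ?_⟩
          intro a ha b hb
          simp only [List.mem_singleton] at hb
          subst hb
          exact fun he => hcond.2 (he ▸ ha)
        intro x hx; rcases List.mem_append.1 hx with hx | hx
        · exact hinv.2 x hx
        · simp at hx; subst hx; exact hsl
      have hlen' : ls.length + 1 ≤ 25 := by
        have := pvInv_len_le hinv'; simpa using this
      have hklt : ls.length < pvNumbers.length := by simp [pvNumbers]; omega
      have hdrop : pvNumbers.drop ls.length
          = pvNumbers[ls.length] :: pvNumbers.drop (ls.length + 1) :=
        List.drop_eq_getElem_cons hklt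
      have hNnd : pvNumbers.Nodup := by decide
      have hfresh : pvNumbers[ls.length] ∉ pvNumbers.take ls.length := by
        have hsplit := List.take_append_drop ls.length pvNumbers
        have : (pvNumbers.take ls.length ++ pvNumbers.drop ls.length).Nodup := by
          rw [hsplit]; exact hNnd
        rw [List.nodup_append] at this
        intro hmem
        have hd : pvNumbers[ls.length] ∈ pvNumbers.drop ls.length := by
          rw [hdrop]; exact List.mem_cons_self
        exact this.2.2 _ hmem _ hd rfl
      have htake : (pvNumbers.take ls.length).length = ls.length := by
        simp [pvNumbers]; omega
      have hkeys : (mkSt ls).1.keys = pvNumbers.take ls.length := by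
        show ((pvNumbers.take ls.length).zip ls).map Prod.fst = pvNumbers.take ls.length
        exact List.map_fst_zip htake.le
      have hcont : (mkSt ls).1.contains (pvNumbers[ls.length]) = false := by
        have : pvNumbers[ls.length] ∉ (mkSt ls).1.keys := by rw [hkeys]; exact hfresh
        rw [← Bool.not_eq_true, PySem.Dict.contains_iff_mem_keys]; exact this
      have hstepA : gStepA p (mkSt ls) s = mkSt (ls ++ [s]) := by
        have hc : (!(mkSt ls).1.values.contains s && p s) = true := by
          simp [hvals, hcond.1, hcond.2]
        have hins : (PySem.Dict.mk ((pvNumbers.take ls.length).zip ls)).insert (pvNumbers[ls.length]) s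
            = PySem.Dict.mk ((pvNumbers.take (ls.length + 1)).zip (ls ++ [s])) := by
          apply PySem.Dict.ext
          have hcont' : (PySem.Dict.mk ((pvNumbers.take ls.length).zip ls)).contains
              pvNumbers[ls.length] = false := hcont
          rw [PySem.Dict.items_insert_of_not_contains _ _ hcont']
          have htakes : pvNumbers.take (ls.length + 1)
              = pvNumbers.take ls.length ++ [pvNumbers[ls.length]] := by
            rw [List.take_add_one]; simp [List.getElem?_eq_getElem hklt]
          rw [htakes, List.zip_append (by rw [htake])]
          simp
        show (if !(mkSt ls).1.values.contains s && p s then _ else _) = _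
        rw [hc, if_pos rfl]
        show (match (mkSt ls).2 with
              | n :: rest => ((mkSt ls).1.insert n s, rest)
              | [] => mkSt ls) = mkSt (ls ++ [s])
        have h2 : (mkSt ls).2 = pvNumbers[ls.length] :: pvNumbers.drop (ls.length + 1) := hdrop
        rw [h2]
        show ((PySem.Dict.mk ((pvNumbers.take ls.length).zip ls)).insert pvNumbers[ls.length] s,
              pvNumbers.drop (ls.length + 1)) = mkSt (ls ++ [s])
        rw [hins]
        simp [mkSt, List.length_append]
      have hstepB : gStepB p ls s = ls ++ [s] := by
        simp [gStepB, hcond.1, hcond.2]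
      rw [List.foldl_cons, List.foldl_cons, hstepA, hstepB]
      exact ih (ls ++ [s]) hinv' (fun x hx hpx => hp x (by simp [hx]) hpx)
    · -- no-op step
      have hstepA : gStepA p (mkSt ls) s = mkSt ls := by
        rcases not_and_or.1 hcond with h | h
        · simp [gStepA, Bool.eq_false_iff.2 h]
        · have : s ∈ ls := not_not.1 h
          simp [gStepA, hvals, this]
      have hstepB : gStepB p ls s = ls := by
        rcases not_and_or.1 hcond with h | h
        · simp [gStepB, Bool.eq_false_iff.2 h]
        · simp [gStepB, not_not.1 h]
      rw [List.foldl_cons, List.foldl_cons, hstepA, hstepB]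
      exact ih ls hinv (fun x hx hpx => hp x (by simp [hx]) hpx)

lemma fill_eq (cs : List String) : ∀ (ls : List String), cs.Nodup →
    cs.foldl (gStepB (fun _ => true)) ls = ls ++ cs.filter (fun s => !ls.contains s) := by
  induction cs with
  | nil => intro ls _; simp
  | cons s cs ih =>
    intro ls hnd
    have hscs : s ∉ cs := (List.nodup_cons.1 hnd).1
    have hnd' : cs.Nodup := (List.nodup_cons.1 hnd).2
    by_cases hmem : s ∈ ls
    · simp [gStepB, hmem, ih ls hnd']
    · have hstep : gStepB (fun _ => true) ls s = ls ++ [s] := by simp [gStepB, hmem]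
      rw [List.foldl_cons, hstep, ih (ls ++ [s]) hnd']
      have hfc : cs.filter (fun x => !(ls ++ [s]).contains x)
          = cs.filter (fun x => !ls.contains x) := by
        apply List.filter_congr
        intro x hx
        have hne : x ≠ s := fun he => hscs (he ▸ hx)
        simp [hne]
      rw [hfc, List.append_assoc]
      simp [hmem]

lemma stepFill_eq (st : PySem.Dict String String × List String) (s : String) :
    pvStepFill st s = gStepA (fun _ => true) st s := by
  simp [pvStepFill, gStepA]

-- ---- find on single-character needles ----

lemma go_nil (sub : List Char) (k : Nat) :
    PySem.Chars.find.go sub [] k = if sub.isEmpty then (k:Int) else -1 := rfl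

lemma go_cons (sub : List Char) (h : Char) (t : List Char) (k : Nat) :
    PySem.Chars.find.go sub (h::t) k
      = if sub.isPrefixOf (h::t) then (k:Int) else PySem.Chars.find.go sub t (k+1) := rfl

lemma go_single_bounds (d : Char) (cs : List Char) : ∀ (k : Nat),
    PySem.Chars.find.go [d] cs k = -1
      ∨ ((k : Int) ≤ PySem.Chars.find.go [d] cs k
          ∧ PySem.Chars.find.go [d] cs k < (k : Int) + cs.length) := by
  induction cs with
  | nil => intro k; left; rfl
  | cons e cs ih =>
    intro k
    rcases hp : List.isPrefixOf [d] (e::cs) with _ | _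
    · rw [go_cons, hp]
      simp only [Bool.false_eq_true, if_false]
      rcases ih (k+1) with h | h
      · left; exact h
      · right
        simp only [List.length_cons]
        push_cast at h ⊢
        omega
    · rw [go_cons, hp, if_pos rfl]
      right
      simp only [List.length_cons]
      push_cast
      omega

lemma find_single_bounds (d : Char) (cs : List Char) :
    PySem.Chars.find cs [d] = -1
      ∨ (0 ≤ PySem.Chars.find cs [d] ∧ PySem.Chars.find cs [d] < cs.length) := by
  have h := go_single_bounds d cs 0
  simpa [PySem.Chars.find] using h

lemma go_single (d : Char) (cs : List Char) : ∀ (k : Nat),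
    PySem.Chars.find.go [d] cs k
      = if PySem.Chars.find cs [d] = -1 then -1 else (k : Int) + PySem.Chars.find cs [d] := by
  induction cs with
  | nil => intro k; rfl
  | cons e cs ih =>
    intro k
    by_cases hde : d = e
    · subst hde
      have hpref : List.isPrefixOf [d] (d::cs) = true := by simp [List.isPrefixOf]
      simp [go_cons, hpref, PySem.Chars.find]
    · have hpref : List.isPrefixOf [d] (e::cs) = false := by
        simp [List.isPrefixOf]; exact hde
      rw [go_cons, hpref]
      simp only [Bool.false_eq_true, if_false]
      rw [ih (k+1)]
      have hfind : PySem.Chars.find (e::cs) [d]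
          = if PySem.Chars.find cs [d] = -1 then -1 else 1 + PySem.Chars.find cs [d] := by
        show PySem.Chars.find.go [d] (e::cs) 0 = _
        rw [go_cons, hpref]
        simp only [Bool.false_eq_true, if_false]
        rw [ih 1]; norm_num
      rw [hfind]
      rcases find_single_bounds d cs with hb | hb
      · simp [hb]
      · have hne : ¬ PySem.Chars.find cs [d] = -1 := by omega
        simp only [if_neg hne, if_neg (show ¬ (1 + PySem.Chars.find cs [d]) = -1 by omega)]
        push_cast; omega

lemma find_snoc (d c : Char) (cs : List Char) :
    PySem.Chars.find (cs ++ [c]) [d]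
      = if PySem.Chars.find cs [d] = -1
          then (if d = c then (cs.length : Int) else -1)
          else PySem.Chars.find cs [d] := by
  induction cs with
  | nil =>
    by_cases hdc : d = c
    · subst hdc
      have : List.isPrefixOf [d] [d] = true := by simp [List.isPrefixOf]
      simp [PySem.Chars.find, go_cons, this, go_nil]
    · have hp : List.isPrefixOf [d] [c] = false := by simp [List.isPrefixOf]; exact hdc
      simp [PySem.Chars.find, go_cons, hp, go_nil, hdc]
  | cons e cs ih =>
    by_cases hde : d = e
    · subst hde
      have hpref : List.isPrefixOf [d] (d::(cs ++ [c])) = true := by simp [List.isPrefixOf]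
      have hpref2 : List.isPrefixOf [d] (d::cs) = true := by simp [List.isPrefixOf]
      simp [PySem.Chars.find, go_cons, hpref, hpref2]
    · have hpref : List.isPrefixOf [d] (e::(cs ++ [c])) = false := by
        simp [List.isPrefixOf]; exact hde
      have hpref2 : List.isPrefixOf [d] (e::cs) = false := by
        simp [List.isPrefixOf]; exact hde
      have h1 : PySem.Chars.find ((e::cs) ++ [c]) [d]
          = PySem.Chars.find.go [d] (cs ++ [c]) 1 := by
        show PySem.Chars.find.go [d] (e::(cs ++ [c])) 0 = _
        rw [go_cons, hpref]
        simp only [Bool.false_eq_true, if_false]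
      have h2 : PySem.Chars.find (e::cs) [d] = PySem.Chars.find.go [d] cs 1 := by
        show PySem.Chars.find.go [d] (e::cs) 0 = _
        rw [go_cons, hpref2]
        simp only [Bool.false_eq_true, if_false]
      rw [h1, h2, go_single, go_single, ih]
      rcases find_single_bounds d cs with hb | hb <;>
        · simp only [List.length_cons]
          split_ifs <;> omega

-- every pvLetters entry is a one-character string
lemma letters_len1 : ∀ s ∈ pvLetters, s.toList.length = 1 := by decide

lemma letters_singleton {s : String} (hs : s ∈ pvLetters) : ∃ d, s.toList = [d] := by
  have h := letters_len1 s hs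
  rcases hl : s.toList with _ | ⟨d, t⟩
  · rw [hl] at h; simp at h
  · rcases t with _ | ⟨e, t⟩
    · exact ⟨d, rfl⟩
    · rw [hl] at h; simp at h

-- shorthand: where a one-letter string first occurs in the character list
def fndS (cs : List Char) (s : String) : Int := PySem.Chars.find cs s.toList

-- rank of a letter inside the alphabet list
def pvIdx (s : String) : Int := ((PySem.List.index? pvLetters s).getD 0 : Int)

-- the collected-letters list of A's first loop, ordered by first occurrence
def pvP (cs : List Char) : Prop :=
  let L := (cs.map String.singleton).foldl (gStepB (fun s => pvLetters.contains s)) []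
  (∀ x ∈ L, x ∈ pvLetters)
  ∧ (∀ x ∈ L, 0 ≤ fndS cs x ∧ fndS cs x < cs.length)
  ∧ (∀ t ∈ pvLetters, t ∉ L → fndS cs t = -1)
  ∧ L.Pairwise (fun a b => fndS cs a < fndS cs b)

lemma pvP_holds (cs : List Char) : pvP cs := by
  induction cs using List.reverseRecOn with
  | nil =>
    refine ⟨by simp, by simp, ?_, by simp⟩
    intro t ht _
    obtain ⟨d, hd⟩ := letters_singleton ht
    simp [fndS, hd, PySem.Chars.find, go_nil]
  | append_singleton cs c ih =>
    obtain ⟨ih0, ih1, ih2, ih3⟩ := ih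
    set p : String → Bool := fun s => pvLetters.contains s with hp
    set L := (cs.map String.singleton).foldl (gStepB p) [] with hL
    have hmap : (cs ++ [c]).map String.singleton = cs.map String.singleton ++ [String.singleton c] := by
      simp
    have hfold : ((cs ++ [c]).map String.singleton).foldl (gStepB p) []
        = gStepB p L (String.singleton c) := by
      rw [hmap, List.foldl_append]; rfl
    set s := String.singleton c with hs
    have hsc : s.toList = [c] := String.toList_singleton c
    -- first occurrences of already-collected letters are unchanged by one more character
    have hkeepL : ∀ x ∈ L, fndS (cs ++ [c]) x = fndS cs x := by
      intro x hx
      obtain ⟨d, hd⟩ := letters_singleton (ih0 x hx)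
      have hb := (ih1 x hx).1
      simp only [fndS, hd] at hb ⊢
      rw [find_snoc, if_neg (by omega)]
    -- letters still uncollected and different from the new character stay unfound
    have hkeepAbs : ∀ t ∈ pvLetters, t ∉ L → t ≠ s → fndS (cs ++ [c]) t = -1 := by
      intro t ht hnt hts
      obtain ⟨d, hd⟩ := letters_singleton ht
      have hdc : d ≠ c := by
        intro he; subst he
        exact hts (String.toList_inj.1 (by rw [hd, hsc]))
      have h0 := ih2 t ht hnt
      simp only [fndS, hd] at h0 ⊢
      rw [find_snoc, if_pos h0, if_neg hdc]
    by_cases hcond : p s = true ∧ s ∉ L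
    · -- a new letter is collected
      have hstep : gStepB p L s = L ++ [s] := by simp [gStepB, hcond.1, hcond.2]
      have hsl : s ∈ pvLetters := by
        have := hcond.1; simpa [hp] using this
      have hfs_old : fndS cs s = -1 := ih2 s hsl hcond.2
      have hfs_new : fndS (cs ++ [c]) s = (cs.length : Int) := by
        have h0 : PySem.Chars.find cs [c] = -1 := by simpa [fndS, hsc] using hfs_old
        simp [fndS, hsc, find_snoc, h0]
      refine ⟨?_, ?_, ?_, ?_⟩ <;> rw [hfold, hstep]
      · intro x hx
        rcases List.mem_append.1 hx with h | h
        · exact ih0 x h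
        · simp at h; subst h; exact hsl
      · intro x hx
        simp only [List.length_append, List.length_cons, List.length_nil]
        rcases List.mem_append.1 hx with h | h
        · rw [hkeepL x h]
          have := ih1 x h
          omega
        · simp at h; subst h
          rw [hfs_new]
          omega
      · intro t ht hnt
        have htL : t ∉ L := fun h => hnt (List.mem_append.2 (Or.inl h))
        have hts : t ≠ s := fun h => hnt (List.mem_append.2 (Or.inr (by simp [h])))
        exact hkeepAbs t ht htL hts
      · rw [List.pairwise_append]
        refine ⟨?_, by simp, ?_⟩
        · exact List.Pairwise.imp_of_mem
            (fun {a b} ha hb hab => by rw [hkeepL a ha, hkeepL b hb]; exact hab) ih3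
        · intro a ha b hb
          simp only [List.mem_singleton] at hb
          subst hb
          rw [hkeepL a ha, hfs_new]
          exact (ih1 a ha).2
    · -- nothing collected
      have hstep : gStepB p L s = L := by
        rcases not_and_or.1 hcond with h | h
        · simp [gStepB, Bool.eq_false_iff.2 h]
        · simp [gStepB, not_not.1 h]
      refine ⟨?_, ?_, ?_, ?_⟩ <;> rw [hfold, hstep]
      · exact ih0
      · intro x hx
        rw [hkeepL x hx]
        have := ih1 x hx
        simp only [List.length_append, List.length_cons, List.length_nil]
        omega
      · intro t ht hnt
        have hts : t ≠ s := by
          intro he; subst he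
          rcases not_and_or.1 hcond with h | h
          · exact h (by simpa [hp] using ht)
          · exact hnt (not_not.1 h)
        exact hkeepAbs t ht hnt hts
      · exact List.Pairwise.imp_of_mem
          (fun {a b} ha hb hab => by rw [hkeepL a ha, hkeepL b hb]; exact hab) ih3

lemma letters_idx_pairwise : pvLetters.Pairwise (fun a b => pvIdx a < pvIdx b) := by decide

-- ===== VERDICT (by name: the statement is the Claim_ definition above) =====
set_option maxHeartbeats 4000000 in
theorem prepare_decode_table_spec : Claim_equal_prepare_decode_table := by
  intro password _
  show (pvLetters.foldl pvStepFill
        ((PySem.Str.upper password).toList.foldl pvStepPw (PySem.Dict.empty, pvNumbers))).1.items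
      = pvNumbers.zip (PySem.List.sorted pvLetters (pvKey (PySem.Str.upper password)))
  set up := PySem.Str.upper password with hup
  set cs := up.toList with hcs
  have hinv0 : pvInv [] := ⟨List.nodup_nil, by simp⟩
  have hmain1 := main_loop (fun s => pvLetters.contains s) (cs.map String.singleton) [] hinv0
    (fun x _ hx => by simpa [List.contains_iff_mem] using hx)
  set ls1 := (cs.map String.singleton).foldl (gStepB (fun s => pvLetters.contains s)) [] with hls1
  have hA1 : cs.foldl pvStepPw (PySem.Dict.empty, pvNumbers) = mkSt ls1 := by
    have h : cs.foldl pvStepPw (PySem.Dict.empty, pvNumbers)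
        = (cs.map String.singleton).foldl (gStepA (fun s => pvLetters.contains s)) (mkSt []) := by
      rw [List.foldl_map]
      rfl
    rw [h, hmain1.1]
  have hmain2 := main_loop (fun _ => true) pvLetters ls1 hmain1.2 (fun x hx _ => hx)
  set ls2 := pvLetters.foldl (gStepB (fun _ => true)) ls1 with hls2
  have hA2 : pvLetters.foldl pvStepFill (mkSt ls1) = mkSt ls2 := by
    have h : pvStepFill = gStepA (fun _ => true) := by
      funext st s; exact stepFill_eq st s
    rw [h, hmain2.1]
  have hfill : ls2 = ls1 ++ pvLetters.filter (fun s => !ls1.contains s) :=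
    fill_eq pvLetters ls1 (by decide)
  have hsub : ∀ x ∈ pvLetters, x ∈ ls2 := by
    intro x hx
    rw [hfill]
    by_cases h : x ∈ ls1
    · exact List.mem_append.2 (Or.inl h)
    · exact List.mem_append.2 (Or.inr (List.mem_filter.2 ⟨hx, by simp [h]⟩))
  have hlen2 : ls2.length = 25 := by
    have hle : ls2.length ≤ 25 := pvInv_len_le hmain2.2
    have hge : 25 ≤ ls2.length := by
      have hLnd : pvLetters.Nodup := by decide
      have := (List.Nodup.subperm hLnd hsub).length_le
      simpa [pvLetters] using this
    omega
  -- permutation: ls2 is a rearrangement of the alphabet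
  have hperm : ls2.Perm pvLetters := by
    refine List.Subperm.perm_of_length_le
      (List.Nodup.subperm hmain2.2.1 (fun x hx => hmain2.2.2 x hx)) ?_
    rw [hlen2]; decide
  -- key facts from the first-loop invariant
  obtain ⟨hP0, hP1, hP2, hP3⟩ := pvP_holds cs
  have hkey_mem : ∀ x ∈ ls1, pvKey up x = fndS cs x := by
    intro x hx
    have h := (hP1 x hx).1
    simp only [fndS] at h
    simp only [pvKey, PySem.Str.find_eq, ← hcs]
    rw [if_pos h]
    rfl
  have hkey_abs : ∀ t ∈ pvLetters, t ∉ ls1 → pvKey up t = (cs.length : Int) + pvIdx t := by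
    intro t ht hnt
    have h := hP2 t ht hnt
    simp only [fndS] at h
    simp only [pvKey, PySem.Str.find_eq, PySem.Str.len_eq, ← hcs]
    rw [if_neg (by omega)]
    rfl
  -- strict key ordering along ls2
  have hpair : ls2.Pairwise (fun a b => pvKey up a < pvKey up b) := by
    rw [hfill, List.pairwise_append]
    refine ⟨?_, ?_, ?_⟩
    · exact List.Pairwise.imp_of_mem
        (fun {a b} ha hb hab => by
          rw [hkey_mem a ha, hkey_mem b hb]; exact hab) hP3
    · refine List.Pairwise.imp_of_mem ?_ (letters_idx_pairwise.filter _)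
      intro a b ha hb hab
      have ha' := List.mem_filter.1 ha
      have hb' := List.mem_filter.1 hb
      rw [hkey_abs a ha'.1 (by simpa using ha'.2), hkey_abs b hb'.1 (by simpa using hb'.2)]
      omega
    · intro a ha b hb
      have hb' := List.mem_filter.1 hb
      rw [hkey_mem a ha, hkey_abs b hb'.1 (by simpa using hb'.2)]
      have h1 := (hP1 a ha).2
      have h2 : 0 ≤ pvIdx b := Int.natCast_nonneg _
      omega
  have hsorted : PySem.List.sorted pvLetters (pvKey up) = ls2 :=
    PySem.List.sorted_eq_of_perm_of_pairwise_lt pvLetters ls2 (pvKey up) hperm hpair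
  rw [hA1, hA2, hsorted, mkSt_items, hlen2]
  have ht : pvNumbers.take 25 = pvNumbers := rfl
  rw [ht]
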